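-- pv_equiv track=rewrite | github.com/Clay-Hamilton/GameTheoryTester | minmaxregret.py | minmax_first
-- ===== SOURCE A (Python) =====
-- def minmax_first(u2):
--     maxlist = []
--     for row in range(len(u2)):
--         maxlist.append(max(u2[row]))
--     finlist = []
--     minnum = min(maxlist)
--     for i in range(len(maxlist)):
--         if maxlist[i] == minnum:
--             finlist.append(i)
--     return finlist
-- ===== SOURCE B (Python) =====
-- def minmax_first(u2):
--     best = None
--     idxs = []
--     for i, row in enumerate(u2):
--         m = max(row)
--         if best is None or m < best:
--             best = m
--             idxs = [i]
--         elif m == best: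
--             idxs.append(i)
--     return idxs
-- ===== Notes on version B (the rewrite author's own statement) =====
-- stated objective: simpler
-- what changed: Replaced the build-maxlist / min() / second index-scan pipeline by a single pass over enumerate(u2) that maintains the running minimum row-max and the list of indices achieving it (reset on strictly smaller, append on equal).
import Mathlib
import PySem

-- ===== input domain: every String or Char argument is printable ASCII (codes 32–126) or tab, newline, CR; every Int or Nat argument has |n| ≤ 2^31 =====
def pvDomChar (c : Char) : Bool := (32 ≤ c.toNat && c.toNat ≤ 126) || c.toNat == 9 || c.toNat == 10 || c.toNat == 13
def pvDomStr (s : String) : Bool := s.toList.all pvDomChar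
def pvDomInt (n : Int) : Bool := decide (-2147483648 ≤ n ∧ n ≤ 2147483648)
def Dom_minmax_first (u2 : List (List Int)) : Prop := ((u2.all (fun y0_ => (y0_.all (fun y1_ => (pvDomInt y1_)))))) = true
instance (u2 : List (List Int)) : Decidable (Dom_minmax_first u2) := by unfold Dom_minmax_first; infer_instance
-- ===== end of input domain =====

-- B replaces A's three passes (build maxlist, min(), index scan) by ONE pass keeping the
-- running minimum row-max and its index list (objective: simpler).

-- ===== PORT A =====
def minmax_first (u2 : List (List Int)) : List Int :=
  let maxlist :=
    (PySem.List.pyRange 0 (u2.length : Int) 1).foldl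
      (fun acc row =>
        acc ++ [(PySem.List.max? (PySem.List.pyGetD u2 row []) (fun y => y)).getD 0]) []
  let minnum := (PySem.List.min? maxlist (fun y => y)).getD 0
  (PySem.List.pyRange 0 (maxlist.length : Int) 1).foldl
    (fun finlist i =>
      if PySem.List.pyGetD maxlist i 0 = minnum then finlist ++ [i] else finlist) []

-- ===== PORT B =====
def minmax_first_alt (u2 : List (List Int)) : List Int :=
  ((PySem.List.enumerate u2 0).foldl
    (fun (s : Option Int × List Int) p =>
      let m := (PySem.List.max? p.2 (fun y => y)).getD 0
      match s.1 with
      | none => (some m, [p.1])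
      | some b =>
        if m < b then (some m, [p.1])
        else if m = b then (some b, s.2 ++ [p.1])
        else s)
    (none, [])).2

-- ===== PRECONDITION & SPEC =====
-- Pre_ excludes exactly the inputs where Python A raises ValueError: empty u2 (min of an
-- empty maxlist) and any empty row (max of an empty sequence).
def Pre_minmax_first (u2 : List (List Int)) : Prop := u2 ≠ [] ∧ ∀ r ∈ u2, r ≠ []
instance (u2 : List (List Int)) : Decidable (Pre_minmax_first u2) := by
  unfold Pre_minmax_first; infer_instance
def pvWitness_minmax_first : List (List Int) := [[1, 2], [3], [0, 2]]

def Spec_minmax_first (u2 : List (List Int)) (out : List Int) : Prop := out = minmax_first_alt u2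
instance (u2 : List (List Int)) (out : List Int) : Decidable (Spec_minmax_first u2 out) := by
  unfold Spec_minmax_first; infer_instance

-- ===== CLAIM =====
def Claim_equal_minmax_first : Prop :=
  ∀ (u2 : List (List Int)), Dom_minmax_first u2 → Pre_minmax_first u2 →
    Spec_minmax_first u2 (minmax_first u2)

-- ===== LEMMAS AND PROOFS =====

-- the row-max value both ports take per row
def pvRowMax (r : List Int) : Int := (PySem.List.max? r (fun y => y)).getD 0

-- indices (starting at i0) of the elements of l equal to m, in order
def pvSel (l : List Int) (i0 m : Int) : List Int :=
  ((PySem.List.enumerate l i0).filter (fun p => p.2 == m)).map Prod.fst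

theorem pvSel_nil (i0 m : Int) : pvSel [] i0 m = [] := by
  simp [pvSel, PySem.List.enumerate_nil]

theorem pvSel_cons (x : Int) (t : List Int) (i0 m : Int) :
    pvSel (x :: t) i0 m = (if x = m then [i0] else []) ++ pvSel t (i0 + 1) m := by
  simp only [pvSel, PySem.List.enumerate_cons, List.filter_cons]
  by_cases h : x = m <;> simp [h]

-- B's fold step on (index, value) pairs
def pvStep (s : Option Int × List Int) (p : Int × Int) : Option Int × List Int :=
  match s.1 with
  | none => (some p.2, [p.1])
  | some b =>
    if p.2 < b then (some p.2, [p.1])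
    else if p.2 = b then (some b, s.2 ++ [p.1])
    else s

theorem pvFoldlMinLe (t : List Int) (b : Int) : t.foldl min b ≤ b := by
  induction t generalizing b with
  | nil => simp
  | cons x t ih => exact le_trans (ih (min b x)) (min_le_left b x)

-- B's fold over rows equals the fold of pvStep over the enumerated row-max list
theorem pvB_map (u : List (List Int)) (i0 : Int) (s : Option Int × List Int) :
    (PySem.List.enumerate u i0).foldl
      (fun (s : Option Int × List Int) p =>
        let m := (PySem.List.max? p.2 (fun y => y)).getD 0
        match s.1 with
        | none => (some m, [p.1])
        | some b =>
          if m < b then (some m, [p.1])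
          else if m = b then (some b, s.2 ++ [p.1])
          else s) s
    = (PySem.List.enumerate (u.map pvRowMax) i0).foldl pvStep s := by
  induction u generalizing i0 s with
  | nil => simp [PySem.List.enumerate_nil]
  | cons x t ih =>
    simp only [List.map_cons, PySem.List.enumerate_cons, List.foldl_cons]
    rw [ih]
    rfl

-- the one-pass invariant
theorem pvInv (l : List Int) (i0 b : Int) (idxs : List Int) :
    (PySem.List.enumerate l i0).foldl pvStep (some b, idxs)
    = (some (l.foldl min b),
       if l.foldl min b = b then idxs ++ pvSel l i0 b
       else pvSel l i0 (l.foldl min b)) := by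
  induction l generalizing i0 b idxs with
  | nil => simp [PySem.List.enumerate_nil, pvSel_nil]
  | cons x t ih =>
    rw [PySem.List.enumerate_cons, List.foldl_cons]
    have hfold : (x :: t).foldl min b = t.foldl min (min b x) := rfl
    by_cases hlt : x < b
    · have hstep : pvStep (some b, idxs) (i0, x) = (some x, [i0]) := by
        simp [pvStep, hlt]
      rw [hstep, ih]
      have hbx : min b x = x := min_eq_right hlt.le
      have hM : (x :: t).foldl min b = t.foldl min x := by rw [hfold, hbx]
      have hMle : t.foldl min x ≤ x := pvFoldlMinLe t x
      have hMneb : t.foldl min x ≠ b := by omega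
      rw [hM]
      simp only [hMneb, if_false]
      rw [pvSel_cons]
      by_cases hx : t.foldl min x = x
      · rw [if_pos hx, if_pos hx.symm, hx]
      · rw [if_neg hx, if_neg (fun h => hx h.symm)]
        simp
    · by_cases heq : x = b
      · have hstep : pvStep (some b, idxs) (i0, x) = (some b, idxs ++ [i0]) := by
          simp [pvStep, heq]
        rw [hstep, ih]
        have hM : (x :: t).foldl min b = t.foldl min b := by
          rw [hfold, heq, min_self]
        rw [hM]
        by_cases hb : t.foldl min b = b
        · rw [if_pos hb, if_pos hb, pvSel_cons, if_pos heq]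
          simp
        · have hMlt : t.foldl min b ≤ b := pvFoldlMinLe t b
          rw [if_neg hb, if_neg hb, pvSel_cons, if_neg (by omega)]
          simp
      · have hgt : b < x := by omega
        have hstep : pvStep (some b, idxs) (i0, x) = (some b, idxs) := by
          simp [pvStep, hlt, heq]
        rw [hstep, ih]
        have hM : (x :: t).foldl min b = t.foldl min b := by
          rw [hfold, min_eq_left hgt.le]
        rw [hM]
        have hMle : t.foldl min b ≤ b := pvFoldlMinLe t b
        by_cases hb : t.foldl min b = b
        · rw [if_pos hb, if_pos hb, pvSel_cons, if_neg heq]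
          simp
        · rw [if_neg hb, if_neg hb, pvSel_cons, if_neg (by omega)]
          simp

-- characterisation of B
theorem pvB_char (r : List Int) (rs : List (List Int)) :
    minmax_first_alt (r :: rs)
    = pvSel ((r :: rs).map pvRowMax) 0
        ((PySem.List.min? ((r :: rs).map pvRowMax) (fun y => y)).getD 0) := by
  unfold minmax_first_alt
  rw [pvB_map]
  simp only [List.map_cons, PySem.List.enumerate_cons, List.foldl_cons]
  have hstep : pvStep (none, []) (0, pvRowMax r) = (some (pvRowMax r), [0]) := rfl
  rw [hstep, pvInv]
  rw [PySem.List.min?_id_cons]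
  simp only [Option.getD_some]
  set x := pvRowMax r with hx
  set t := rs.map pvRowMax with ht
  have hMle : t.foldl min x ≤ x := pvFoldlMinLe t x
  by_cases hxx : t.foldl min x = x
  · rw [if_pos hxx, pvSel_cons, if_pos hxx.symm, hxx]
  · rw [if_neg hxx, pvSel_cons, if_neg (fun h => hxx h.symm)]
    simp

-- A's index scan: the pyRange fold collects exactly the matching indices
theorem pvA_scan (L : List Int) (m : Int) (j : Nat) (acc : List Int) :
    (PySem.List.pyRange (j : Int) (L.length : Int) 1).foldl
      (fun finlist i => if PySem.List.pyGetD L i 0 = m then finlist ++ [i] else finlist) acc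
    = acc ++ pvSel (L.drop j) (j : Int) m := by
  by_cases hj : L.length ≤ j
  · rw [PySem.List.pyRange_one_eq_nil (by exact_mod_cast hj), List.drop_eq_nil_of_le hj,
      pvSel_nil]
    simp
  · replace hj := Nat.lt_of_not_le hj
    rw [PySem.List.pyRange_one_cons (by exact_mod_cast hj), List.foldl_cons]
    have hget : PySem.List.pyGetD L (j : Int) 0 = L[j] := by
      rw [PySem.List.pyGetD_natCast, List.getD_eq_getElem _ _ hj]
    have hdrop : L.drop j = L[j] :: L.drop (j + 1) := List.drop_eq_getElem_cons hj
    rw [hdrop, pvSel_cons, hget]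
    have hrec := pvA_scan L m (j + 1)
    by_cases hx : L[j] = m
    · rw [if_pos hx, if_pos hx]
      have : ((j : Int) + 1) = ((j + 1 : Nat) : Int) := by push_cast; ring
      rw [this, hrec (acc ++ [(j : Int)])]
      simp
    · rw [if_neg hx, if_neg hx]
      have : ((j : Int) + 1) = ((j + 1 : Nat) : Int) := by push_cast; ring
      rw [this, hrec acc]
      simp
termination_by L.length - j

-- characterisation of A
theorem pvA_char (u2 : List (List Int)) :
    minmax_first u2
    = pvSel (u2.map pvRowMax) 0
        ((PySem.List.min? (u2.map pvRowMax) (fun y => y)).getD 0) := by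
  unfold minmax_first
  have hmax :
      (PySem.List.pyRange 0 (u2.length : Int) 1).foldl
        (fun acc row =>
          acc ++ [(PySem.List.max? (PySem.List.pyGetD u2 row []) (fun y => y)).getD 0]) []
      = u2.map pvRowMax := by
    rw [PySem.List.foldl_pyRange_zero_pyGetD' u2 []
      (fun acc row => acc ++ [(PySem.List.max? row (fun y => y)).getD 0]) []]
    rw [PySem.List.foldl_append_singleton_eq_map]
    rfl
  simp only [hmax]
  have h := pvA_scan (u2.map pvRowMax)
    ((PySem.List.min? (u2.map pvRowMax) (fun y => y)).getD 0) 0 []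
  simpa using h

-- ===== VERDICT =====
theorem minmax_first_spec : Claim_equal_minmax_first := by
  intro u2 _ hpre
  unfold Spec_minmax_first
  cases u2 with
  | nil => exact absurd rfl hpre.1
  | cons r rs => rw [pvA_char, pvB_char]
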